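-- pv_equiv track=rewrite | github.com/ClasesFilosIngen/rulegenerator-America1096 | genRules.py | init_pass
-- ===== SOURCE A (Python) =====
-- def init_pass(T):
--     C1 = []
--     for conjunto in T:
--         for elemento in conjunto:
--             if not [elemento] in C1:
--                 C1.append([elemento])
--
--     C1.sort()
--     return list(map(frozenset, C1))#Permite crear conjuntos
-- ===== SOURCE B (Python) =====
-- def init_pass(T):
--     flat = []
--     for conjunto in T:
--         flat.extend(conjunto)
--     flat.sort()
--     out = []
--     prev = None
--     for x in flat:
--         if prev is None or x != prev:
--             out.append(frozenset([x]))
--             prev = x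
--     return out
-- ===== Notes on version B (the rewrite author's own statement) =====
-- stated objective: faster
-- what changed: B replaces A's O(N*K) 'not [x] in C1' list-membership dedup over singleton lists (plus a sort of those lists) by one flatten pass, one sort of the bare elements, and a single linear adjacent-duplicate-removal pass.
import Mathlib
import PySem

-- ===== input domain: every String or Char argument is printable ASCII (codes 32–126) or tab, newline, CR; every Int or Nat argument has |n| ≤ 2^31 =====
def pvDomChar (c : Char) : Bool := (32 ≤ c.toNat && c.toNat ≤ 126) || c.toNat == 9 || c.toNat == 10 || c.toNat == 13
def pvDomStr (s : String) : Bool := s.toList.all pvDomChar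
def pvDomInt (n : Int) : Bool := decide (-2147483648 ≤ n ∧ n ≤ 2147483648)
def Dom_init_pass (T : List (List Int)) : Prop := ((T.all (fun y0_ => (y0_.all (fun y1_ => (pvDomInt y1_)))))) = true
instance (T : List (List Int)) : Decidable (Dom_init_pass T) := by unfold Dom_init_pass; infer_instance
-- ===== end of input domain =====

-- B flattens once, sorts the bare elements once and removes adjacent duplicates in one linear
-- pass, instead of A's O(N·K) list-membership dedup followed by a sort of singleton lists.
-- (frozenset([x]) is ported as PySem.Set.ofList [x], a one-element set as a list.)

-- ===== PORT A =====
def init_pass (T : List (List Int)) : List (List Int) :=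
  let C1 := T.foldl (fun C1 conjunto =>
      conjunto.foldl (fun C1 elemento =>
        if [elemento] ∈ C1 then C1 else C1 ++ [[elemento]]) C1) []
  -- C1.sort() : Python sorts the lists lexicographically; then map(frozenset, C1)
  (PySem.List.sorted C1 (fun x => x) false).map (fun c => PySem.Set.ofList c)

-- ===== PORT B =====
def init_pass_alt (T : List (List Int)) : List (List Int) :=
  let flat := T.foldl (fun flat conjunto => flat ++ conjunto) []
  let s := PySem.List.sorted flat (fun x => x) false
  (s.foldl (fun (st : List (List Int) × Option Int) x =>
      match st.2 with
      | none => (st.1 ++ [PySem.Set.ofList [x]], some x)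
      | some p => if x ≠ p then (st.1 ++ [PySem.Set.ofList [x]], some x) else st)
    ([], none)).1

-- ===== PRECONDITION & SPEC =====
def Spec_init_pass (T : List (List Int)) (out : List (List Int)) : Prop := out = init_pass_alt T
instance (T : List (List Int)) (out : List (List Int)) : Decidable (Spec_init_pass T out) := by unfold Spec_init_pass; infer_instance

-- ===== CLAIM (what is proved, stated in full; the proofs are below) =====
def Claim_equal_init_pass : Prop := ∀ (T : List (List Int)), Dom_init_pass T → Spec_init_pass T (init_pass T)

-- ===== LEMMAS AND PROOFS =====

-- the int-level ordered dedup step A's inner loop performs on the heads of its singleton lists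
def iStep (acc : List Int) (e : Int) : List Int := if e ∈ acc then acc else acc ++ [e]

-- the int-level adjacent-dedup step B performs (state: kept list, previous kept element)
def jStep (st : List Int × Option Int) (x : Int) : List Int × Option Int :=
  match st.2 with
  | none => (st.1 ++ [x], some x)
  | some p => if x ≠ p then (st.1 ++ [x], some x) else st

theorem decLTlistInt : (LinearOrder.toDecidableLT : DecidableLT (List Int)) = (fun a b => a.decidableLT b) := by
  funext a b; exact Subsingleton.elim _ _

theorem singleton_lt_singleton (a b : Int) : (([a] : List Int) < [b]) ↔ a < b := by
  rw [List.cons_lt_cons_iff]; simp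

-- A's inner loop on singleton lists is the int-level dedup, mapped through e ↦ [e]
theorem inner_map (l : List Int) (acc : List Int) :
    l.foldl (fun C e => if [e] ∈ C then C else C ++ [[e]]) (acc.map (fun e => [e]))
      = (l.foldl iStep acc).map (fun e => [e]) := by
  induction l generalizing acc with
  | nil => rfl
  | cons a l ih =>
    have hmem : ([a] ∈ acc.map (fun e => [e])) ↔ a ∈ acc := by simp
    simp only [List.foldl_cons, iStep]
    by_cases h : a ∈ acc
    · rw [if_pos (hmem.mpr h), if_pos h]; exact ih acc
    · rw [if_neg (fun hc => h (hmem.mp hc)), if_neg h]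
      have : acc.map (fun e => [e]) ++ [[a]] = (acc ++ [a]).map (fun e => [e]) := by simp
      rw [this]; exact ih (acc ++ [a])

theorem outer_map (T : List (List Int)) (acc : List Int) :
    T.foldl (fun C l => l.foldl (fun C e => if [e] ∈ C then C else C ++ [[e]]) C)
        (acc.map (fun e => [e]))
      = (T.foldl (fun C l => l.foldl iStep C) acc).map (fun e => [e]) := by
  induction T generalizing acc with
  | nil => rfl
  | cons l T ih =>
    simp only [List.foldl_cons]
    rw [inner_map l acc]; exact ih _

theorem dedup_props (xs : List Int) (acc : List Int) (hnd : acc.Nodup) :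
    (xs.foldl iStep acc).Nodup ∧ ∀ x, x ∈ xs.foldl iStep acc ↔ x ∈ acc ∨ x ∈ xs := by
  induction xs generalizing acc with
  | nil => simpa using hnd
  | cons a xs ih =>
    simp only [List.foldl_cons, iStep]
    by_cases h : a ∈ acc
    · rw [if_pos h]
      obtain ⟨h1, h2⟩ := ih acc hnd
      refine ⟨h1, fun x => ?_⟩
      rw [h2 x]; simp only [List.mem_cons]
      constructor
      · rintro (hx | hx) <;> tauto
      · rintro (hx | rfl | hx) <;> tauto
    · rw [if_neg h]
      have hnd' : (acc ++ [a]).Nodup := by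
        simp [List.nodup_append, hnd]
        intro z hz he
        exact h (he ▸ hz)
      obtain ⟨h1, h2⟩ := ih (acc ++ [a]) hnd'
      refine ⟨h1, fun x => ?_⟩
      rw [h2 x]; simp only [List.mem_append, List.mem_cons]
      tauto

-- B's fold on singleton frozensets is the int-level fold, mapped through e ↦ [e]
theorem pair_map (s : List Int) (out : List Int) (prev : Option Int) :
    s.foldl (fun (st : List (List Int) × Option Int) x =>
        match st.2 with
        | none => (st.1 ++ [PySem.Set.ofList [x]], some x)
        | some p => if x ≠ p then (st.1 ++ [PySem.Set.ofList [x]], some x) else st)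
      (out.map (fun e => [e]), prev)
      = ((s.foldl jStep (out, prev)).1.map (fun e => [e]), (s.foldl jStep (out, prev)).2) := by
  induction s generalizing out prev with
  | nil => rfl
  | cons x s ih =>
    have hofl : PySem.Set.ofList [x] = [x] := rfl
    cases prev with
    | none =>
      simp only [List.foldl_cons, jStep, hofl]
      have : out.map (fun e => [e]) ++ [[x]] = (out ++ [x]).map (fun e => [e]) := by simp
      rw [this]; exact ih (out ++ [x]) (some x)
    | some p =>
      simp only [List.foldl_cons, jStep, hofl]
      by_cases h : x ≠ p
      · rw [if_pos h, if_pos h]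
        have : out.map (fun e => [e]) ++ [[x]] = (out ++ [x]).map (fun e => [e]) := by simp
        rw [this]; exact ih (out ++ [x]) (some x)
      · rw [if_neg h, if_neg h]; exact ih out (some p)

-- adjacent dedup of a ≤-sorted run is strictly increasing and keeps exactly the members
theorem adj_props (s : List Int) (out : List Int) (prev : Option Int)
    (hs : s.Pairwise (· ≤ ·))
    (hp : ∀ p, prev = some p → p ∈ out ∧ (∀ z ∈ out, z ≤ p) ∧ ∀ y ∈ s, p ≤ y)
    (hn : prev = none → out = [])
    (ho : out.Pairwise (· < ·)) :
    (s.foldl jStep (out, prev)).1.Pairwise (· < ·) ∧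
      ∀ x, x ∈ (s.foldl jStep (out, prev)).1 ↔ x ∈ out ∨ x ∈ s := by
  induction s generalizing out prev with
  | nil => exact ⟨ho, by simp⟩
  | cons x s ih =>
    rw [List.pairwise_cons] at hs
    cases prev with
    | none =>
      have hout : out = [] := hn rfl
      subst hout
      simp only [List.foldl_cons, jStep, List.nil_append]
      obtain ⟨h1, h2⟩ := ih [x] (some x) hs.2
        (fun p hp' => by
          cases hp'
          exact ⟨by simp, by simp, hs.1⟩)
        (by simp) (by simp)
      refine ⟨h1, fun y => ?_⟩
      rw [h2 y]; simp
    | some p =>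
      obtain ⟨hpin, hple, hpfut⟩ := hp p rfl
      simp only [List.foldl_cons, jStep]
      by_cases h : x ≠ p
      · have hpx : p < x := lt_of_le_of_ne (hpfut x (by simp)) (fun he => h he.symm)
        rw [if_pos h]
        have hlt : ∀ z ∈ out, z < x := fun z hz => lt_of_le_of_lt (hple z hz) hpx
        obtain ⟨h1, h2⟩ := ih (out ++ [x]) (some x) hs.2
          (fun q hq => by
            cases hq
            refine ⟨by simp, ?_, hs.1⟩
            intro z hz
            rcases List.mem_append.mp hz with hz | hz
            · exact le_of_lt (hlt z hz)
            · simp at hz; simp [hz])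
          (by simp)
          (by
            rw [List.pairwise_append]
            exact ⟨ho, by simp, by simpa using hlt⟩)
        refine ⟨h1, fun y => ?_⟩
        rw [h2 y]; simp only [List.mem_append, List.mem_cons]; tauto
      · rw [if_neg h]
        rw [not_ne_iff] at h; subst h
        obtain ⟨h1, h2⟩ := ih out (some x) hs.2
          (fun q hq => by cases hq; exact ⟨hpin, hple, hs.1⟩)
          (by simp) ho
        refine ⟨h1, fun y => ?_⟩
        rw [h2 y]; simp only [List.mem_cons]
        constructor
        · rintro (hy | hy) <;> tauto
        · rintro (hy | rfl | hy) <;> tauto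

theorem strict_of_le_nodup {l : List Int} (hle : l.Pairwise (· ≤ ·)) (hnd : l.Nodup) :
    l.Pairwise (· < ·) :=
  (hle.and hnd).imp (fun h => lt_of_le_of_ne h.1 h.2)

theorem strict_sorted_eq {l₁ l₂ : List Int}
    (h₁ : l₁.Pairwise (· < ·)) (h₂ : l₂.Pairwise (· < ·))
    (hm : ∀ x, x ∈ l₁ ↔ x ∈ l₂) : l₁ = l₂ := by
  have hnd₁ : l₁.Nodup := h₁.imp (fun h => ne_of_lt h)
  have hnd₂ : l₂.Nodup := h₂.imp (fun h => ne_of_lt h)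
  have hperm : l₁.Perm l₂ := by
    apply List.perm_of_nodup_nodup_toFinset_eq hnd₁ hnd₂
    ext x; simp [List.mem_toFinset, hm x]
  exact List.Perm.eq_of_pairwise (le := (· ≤ ·))
    (fun a b _ _ hab hba => le_antisymm hab hba)
    (h₁.imp le_of_lt) (h₂.imp le_of_lt) hperm

-- ===== VERDICT (by name: the statement is the Claim_ definition above) =====
theorem init_pass_spec : Claim_equal_init_pass := by
  intro T _
  show Spec_init_pass T (init_pass T)
  unfold Spec_init_pass
  simp only [init_pass, init_pass_alt]
  set flat : List Int := T.flatMap id with hflat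
  have hfold : flat.foldl iStep [] = T.foldl (fun C l => l.foldl iStep C) [] := by
    rw [hflat, List.foldl_flatMap]; rfl
  have hC1 : T.foldl (fun C1 conjunto =>
      conjunto.foldl (fun C1 elemento =>
        if [elemento] ∈ C1 then C1 else C1 ++ [[elemento]]) C1) []
      = (flat.foldl iStep []).map (fun e => [e]) := by
    have h := outer_map T []
    simp only [List.map_nil] at h
    rw [h, hfold]
  set D : List Int := flat.foldl iStep [] with hD
  obtain ⟨hDnd, hDmem⟩ := dedup_props flat [] List.nodup_nil
  have hflatb : T.foldl (fun flat conjunto => flat ++ conjunto) [] = flat := by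
    have h := PySem.List.foldl_append_eq_flatMap (fun c : List Int => c) T []
    rw [hflat]
    simpa using h
  -- the sorted int-level dedup, strictly increasing
  set ys : List Int := PySem.List.sorted D (fun x => x) false with hys
  have hysle : ys.Pairwise (· ≤ ·) := PySem.List.sorted_pairwise D (fun x => x)
  have hysperm : ys.Perm D := PySem.List.sorted_perm D (fun x => x) false
  have hysnd : ys.Nodup := hysperm.nodup_iff.mpr hDnd
  have hyslt : ys.Pairwise (· < ·) := strict_of_le_nodup hysle hysnd
  -- A's sort of the singleton lists is ys mapped to singletons
  have hsortA : PySem.List.sorted (D.map fun e => [e]) (fun x => x) false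
      = ys.map (fun e => [e]) := by
    have h := PySem.List.sorted_eq_of_perm_of_pairwise_lt
      (D.map fun e => [e]) (ys.map fun e => [e]) (fun x => x)
      (hysperm.map _)
      (List.Pairwise.map _ (fun a b hab => (singleton_lt_singleton a b).mpr hab) hyslt)
    rw [decLTlistInt] at h
    exact h
  -- B's adjacent dedup of the sorted flat list
  have hsle : (PySem.List.sorted flat (fun x => x) false).Pairwise (· ≤ ·) :=
    PySem.List.sorted_pairwise flat (fun x => x)
  have hsmem : ∀ x : Int, x ∈ PySem.List.sorted flat (fun x => x) false ↔ x ∈ flat :=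
    fun x => PySem.List.mem_sorted flat (fun x => x) false x
  obtain ⟨hzslt, hzsmem⟩ := adj_props (PySem.List.sorted flat (fun x => x) false) [] none
    hsle (by simp) (fun _ => rfl) List.Pairwise.nil
  -- ys equals B's deduped list: both strictly increasing with exactly flat's members
  have hyszs : ys = ((PySem.List.sorted flat (fun x => x) false).foldl jStep ([], none)).1 := by
    apply strict_sorted_eq hyslt hzslt
    intro x
    rw [hysperm.mem_iff, hDmem x, hzsmem x, hsmem x]
  -- assemble
  rw [hC1, hsortA, hflatb]
  have hpair := pair_map (PySem.List.sorted flat (fun x => x) false) [] none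
  simp only [List.map_nil] at hpair
  rw [hpair, ← hyszs]
  have hof : (fun c => PySem.Set.ofList c) ∘ (fun e : Int => [e]) = (fun e : Int => [e]) := by
    funext e; rfl
  simp [List.map_map, hof]
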